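-- pv_equiv track=rewrite | github.com/roamgom/cote | python/programmers/stack_queue/development.py | solution
-- ===== SOURCE A (Python) =====
-- import math
--
-- def solution(progresses, speeds):
--     answer = []
--     days_spent = []
--     for index in range(len(progresses)):
--         days_spent.append(math.ceil((100 - progresses[index]) / speeds[index]))
--
--     for index in range(1, len(days_spent)):
--         if days_spent[index-1] > days_spent[index]:
--             days_spent[index] = days_spent[index-1]
--
--     tasks = 1
--     for index in range(1, len(days_spent)):
--         if days_spent[index-1] >= days_spent[index]:
--             tasks += 1
--         else:
--             answer.append(tasks)
--             tasks = 1
--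
--     # append last amount of tasks
--     answer.append(tasks)
--
--     return answer
-- ===== SOURCE B (Python) =====
-- import math
--
--
-- def solution(progresses, speeds):
--     # Single pass: keep only the current blocking deploy day ('front') and the
--     # size of the batch it heads, instead of building and rewriting day arrays.
--     answer = []
--     front = None
--     tasks = 1
--     for p, s in zip(progresses, speeds):
--         d = math.ceil((100 - p) / s)
--         if front is None:
--             front = d
--         elif d <= front:
--             tasks += 1
--         else:
--             answer.append(tasks)
--             tasks = 1
--             front = d
--     answer.append(tasks)
--     return answer
-- ===== Notes on version B (the rewrite author's own statement) =====
-- stated objective: simpler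
-- what changed: A builds a days array, forward-max-propagates it in a second pass and regroups it in a third; B is one fused pass over zip(progresses, speeds) that keeps only a scalar running front day and the current batch size, with no intermediate array.
import Mathlib
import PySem

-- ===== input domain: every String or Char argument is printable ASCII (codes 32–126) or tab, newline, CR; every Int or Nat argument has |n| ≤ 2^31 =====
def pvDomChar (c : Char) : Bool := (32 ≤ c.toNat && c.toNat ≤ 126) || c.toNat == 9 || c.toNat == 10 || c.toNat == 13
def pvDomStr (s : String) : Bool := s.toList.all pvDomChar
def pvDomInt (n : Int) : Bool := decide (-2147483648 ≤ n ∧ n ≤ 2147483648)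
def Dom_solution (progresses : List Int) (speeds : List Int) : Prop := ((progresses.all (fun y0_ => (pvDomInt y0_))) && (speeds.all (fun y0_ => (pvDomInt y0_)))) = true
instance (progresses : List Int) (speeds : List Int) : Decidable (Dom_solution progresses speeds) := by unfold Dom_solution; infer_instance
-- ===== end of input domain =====

-- B fuses A's three passes (build days, forward-max, group) into one pass that keeps only a
-- scalar running front day and the current batch size.

-- math.ceil((100 - p) / s): exact integer ceiling ⌈(100-p)/s⌉, which equals Python's
-- float-division ceil on the whole domain (|100 - p| ≤ 2^31 + 100 < 2^53, s ≠ 0).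
def cdiv (p : Int) (s : Int) : Int := -(PySem.Int.floordiv (-(100 - p)) s)

-- ===== PORT A =====
def solution (progresses : List Int) (speeds : List Int) : List Int :=
  -- pass 1: days_spent.append(ceil((100 - progresses[i]) / speeds[i]))
  let days1 := (PySem.List.pyRange 0 (progresses.length : Int) 1).foldl
    (fun acc i => acc ++ [cdiv (PySem.List.pyGetD progresses i 0) (PySem.List.pyGetD speeds i 0)]) []
  -- pass 2: forward max propagation, days_spent[i] = days_spent[i-1] if it was larger
  let days2 := (PySem.List.pyRange 1 (days1.length : Int) 1).foldl
    (fun ds i => if PySem.List.pyGetD ds (i - 1) 0 > PySem.List.pyGetD ds i 0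
                 then ds.set i.toNat (PySem.List.pyGetD ds (i - 1) 0) else ds) days1
  -- pass 3: group equal/descending runs, counting tasks
  let st := (PySem.List.pyRange 1 (days2.length : Int) 1).foldl
    (fun (st : List Int × Int) i =>
      if PySem.List.pyGetD days2 (i - 1) 0 ≥ PySem.List.pyGetD days2 i 0
      then (st.1, st.2 + 1) else (st.1 ++ [st.2], 1)) ([], 1)
  st.1 ++ [st.2]

-- ===== PORT B =====
def solution_alt (progresses : List Int) (speeds : List Int) : List Int :=
  let st := (progresses.zip speeds).foldl
    (fun (st : List Int × Option Int × Int) pr =>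
      let d := cdiv pr.1 pr.2
      match st with
      | (acc, none, tasks) => (acc, some d, tasks)
      | (acc, some front, tasks) =>
        if d ≤ front then (acc, some front, tasks + 1)
        else (acc ++ [tasks], some d, 1))
    ([], none, 1)
  st.1 ++ [st.2.2]

-- ===== PRECONDITION & SPEC =====
-- Pre_ excludes exactly the inputs on which A raises: too few speeds (IndexError) or a
-- zero speed (ZeroDivisionError).
def Pre_solution (progresses : List Int) (speeds : List Int) : Prop :=
  progresses.length ≤ speeds.length ∧ ∀ s ∈ speeds, s ≠ 0
instance (progresses : List Int) (speeds : List Int) : Decidable (Pre_solution progresses speeds) := by unfold Pre_solution; infer_instance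
def pvWitness_solution : List Int × List Int := ([93, 30, 55], [1, 30, 5])

def Spec_solution (progresses : List Int) (speeds : List Int) (out : List Int) : Prop := out = solution_alt progresses speeds
instance (progresses : List Int) (speeds : List Int) (out : List Int) : Decidable (Spec_solution progresses speeds out) := by unfold Spec_solution; infer_instance

-- ===== CLAIM (what is proved, stated in full; the proofs are below) =====
def Claim_equal_solution : Prop := ∀ (progresses : List Int) (speeds : List Int), Dom_solution progresses speeds → Pre_solution progresses speeds → Spec_solution progresses speeds (solution progresses speeds)

-- ===== LEMMAS AND PROOFS =====

-- running maximum of the first i+1 days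
def rmv (ds : List Int) (i : Nat) : Int := (ds.take (i + 1)).foldl max (ds.headD 0)

-- reference grouping state after the loop has processed indices 1..m-1
def gstep (ds : List Int) (st : List Int × Int) (i : Nat) : List Int × Int :=
  if rmv ds (i - 1) ≥ rmv ds i then (st.1, st.2 + 1) else (st.1 ++ [st.2], 1)

def gstate (ds : List Int) : Nat → List Int × Int
  | 0 => ([], 1)
  | m + 1 => if m = 0 then ([], 1) else gstep ds (gstate ds m) m

theorem foldl_pyRange_invariant {σ : Type} (f : σ → Int → σ) (P : Int → σ → Prop)
    (a b : Int) (hab : a ≤ b) (init : σ) (h0 : P a init)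
    (hstep : ∀ m s, a ≤ m → m < b → P m s → P (m + 1) (f s m)) :
    P b ((PySem.List.pyRange a b 1).foldl f init) := by
  obtain ⟨n, hn⟩ : ∃ n : Nat, b - a = (n : Int) := ⟨(b - a).toNat, by omega⟩
  induction n generalizing a init with
  | zero =>
    have hba : b = a := by omega
    rw [hba, PySem.List.pyRange_one_eq_nil le_rfl]
    simpa [hba] using h0
  | succ k ih =>
    rw [PySem.List.pyRange_one_cons (by omega), List.foldl_cons]
    exact ih (a + 1) (by omega) (f init a)
      (hstep a init le_rfl (by omega) h0)
      (fun m s h1 h2 h3 => hstep m s (by omega) h2 h3)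
      (by omega)

theorem rmv_zero (d : Int) (t : List Int) : rmv (d :: t) 0 = d := by
  simp [rmv]

theorem rmv_succ (ds : List Int) (i : Nat) (h : i + 1 < ds.length) :
    rmv ds (i + 1) = max (rmv ds i) (ds.getD (i + 1) 0) := by
  unfold rmv
  rw [List.take_add_one, List.getElem?_eq_getElem h, List.foldl_append,
    List.getD_eq_getElem ds 0 h]
  rfl

theorem gstate_succ (ds : List Int) (k : Nat) (hk : 1 ≤ k) :
    gstate ds (k + 1) = gstep ds (gstate ds k) k := by
  have : k ≠ 0 := by omega
  simp [gstate, this]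

-- B's loop step, expressed on the precomputed day d
def stepB (st : List Int × Option Int × Int) (d : Int) : List Int × Option Int × Int :=
  match st with
  | (acc, none, _tasks) => (acc, some d, _tasks)
  | (acc, some front, tasks) =>
    if d ≤ front then (acc, some front, tasks + 1)
    else (acc ++ [tasks], some d, 1)

theorem stepB_go (ds : List Int) (k : Nat) (hk : 1 ≤ k) (hkn : k ≤ ds.length) :
    (ds.drop k).foldl stepB ((gstate ds k).1, some (rmv ds (k - 1)), (gstate ds k).2) =
      ((gstate ds ds.length).1, some (rmv ds (ds.length - 1)), (gstate ds ds.length).2) := by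
  obtain ⟨n, hn⟩ : ∃ n : Nat, ds.length - k = n := ⟨ds.length - k, rfl⟩
  induction n generalizing k with
  | zero =>
    have hkl : k = ds.length := by omega
    rw [hkl, List.drop_length, List.foldl_nil]
  | succ m ih =>
    have hklt : k < ds.length := by omega
    rw [List.drop_eq_getElem_cons hklt, List.foldl_cons]
    have hrmv : rmv ds k = max (rmv ds (k - 1)) (ds.getD k 0) := by
      have := rmv_succ ds (k - 1) (by omega)
      rwa [Nat.sub_add_cancel hk] at this
    have hgd : ds.getD k 0 = ds[k] := List.getD_eq_getElem ds 0 hklt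
    have hstate : stepB ((gstate ds k).1, some (rmv ds (k - 1)), (gstate ds k).2) ds[k] =
        ((gstate ds (k + 1)).1, some (rmv ds k), (gstate ds (k + 1)).2) := by
      rw [gstate_succ ds k hk]
      unfold stepB gstep
      by_cases hle : ds[k] ≤ rmv ds (k - 1)
      · have hmax : rmv ds k = rmv ds (k - 1) := by
          rw [hrmv, hgd]; exact max_eq_left hle
        simp [hle, hmax]
      · have hmax : rmv ds k = ds[k] := by
          rw [hrmv, hgd]; exact max_eq_right (not_le.mp hle).le
        simp [hle, hmax]
    rw [hstate]
    have hsub : k + 1 - 1 = k := by omega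
    have := ih (k + 1) (by omega) (by omega) (by omega)
    rwa [hsub] at this

theorem rmv_zero' (ds : List Int) (hne : ds ≠ []) : rmv ds 0 = ds.getD 0 0 := by
  obtain ⟨d, t, rfl⟩ := List.exists_cons_of_ne_nil hne
  simp [rmv_zero]

theorem solution_eq_gstate (progresses speeds : List Int)
    (h : Pre_solution progresses speeds) :
    solution progresses speeds =
      (gstate ((progresses.zip speeds).map (fun pr => cdiv pr.1 pr.2)) progresses.length).1 ++
        [(gstate ((progresses.zip speeds).map (fun pr => cdiv pr.1 pr.2)) progresses.length).2] := by
  obtain ⟨hlen, -⟩ := h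
  set ds := (progresses.zip speeds).map (fun pr => cdiv pr.1 pr.2) with hds
  have hdslen : ds.length = progresses.length := by
    simp [hds, List.length_zip]; omega
  simp only [solution]
  -- pass 1 builds exactly ds
  have h1 : (PySem.List.pyRange 0 (progresses.length : Int) 1).foldl
      (fun acc i => acc ++ [cdiv (PySem.List.pyGetD progresses i 0) (PySem.List.pyGetD speeds i 0)]) [] = ds := by
    have := foldl_pyRange_invariant
      (fun acc i => acc ++ [cdiv (PySem.List.pyGetD progresses i 0) (PySem.List.pyGetD speeds i 0)])
      (fun m acc => acc = ds.take m.toNat) 0 (progresses.length : Int) (by omega) []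
      (by simp)
      (by
        intro m acc hm0 hmn hacc
        have hmp : m.toNat < progresses.length := by omega
        have hms : m.toNat < speeds.length := by omega
        have hmds : m.toNat < ds.length := by omega
        have hp : PySem.List.pyGetD progresses m 0 = progresses[m.toNat] :=
          PySem.List.pyGetD_eq_getElem progresses (i := m) 0 hm0 (by omega)
        have hsv : PySem.List.pyGetD speeds m 0 = speeds[m.toNat] :=
          PySem.List.pyGetD_eq_getElem speeds (i := m) 0 hm0 (by omega)
        have hdm : ds[m.toNat] = cdiv progresses[m.toNat] speeds[m.toNat] := by
          simp [hds]
        have htake : ds.take ((m + 1).toNat) = ds.take m.toNat ++ [ds[m.toNat]] := by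
          have : (m + 1).toNat = m.toNat + 1 := by omega
          rw [this, List.take_add_one, List.getElem?_eq_getElem hmds]
          rfl
        simp only []
        rw [hacc, hp, hsv, htake, hdm])
    rw [this]
    exact List.take_of_length_le (by omega)
  rw [h1]
  -- degenerate case: no tasks at all
  rcases Nat.eq_zero_or_pos progresses.length with hn0 | hn1
  · have hdsnil : ds = [] := List.eq_nil_of_length_eq_zero (by omega)
    rw [hdsnil, hn0]
    norm_num [PySem.List.pyRange_one_eq_nil, gstate]
  have hdsne : ds ≠ [] := by
    intro hnil; rw [hnil] at hdslen; simp at hdslen; omega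
  -- pass 2 turns ds into its running maxima
  have h2 := foldl_pyRange_invariant
    (fun ds' i => if PySem.List.pyGetD ds' (i - 1) 0 > PySem.List.pyGetD ds' i 0
                  then ds'.set i.toNat (PySem.List.pyGetD ds' (i - 1) 0) else ds')
    (fun m L => L.length = ds.length ∧
      ∀ i : Nat, i < ds.length → L.getD i 0 = if (i : Int) < m then rmv ds i else ds.getD i 0)
    1 (ds.length : Int) (by omega) ds
    (by
      refine ⟨rfl, ?_⟩
      intro i hi
      by_cases h0 : (i : Int) < 1
      · have : i = 0 := by omega
        simp [this, rmv_zero' ds hdsne]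
      · simp [h0])
    (by
      intro m L hm1 hmn hP
      simp only []
      obtain ⟨hLlen, hL⟩ := hP
      have hm1n : m.toNat - 1 < ds.length := by omega
      have hmn' : m.toNat < ds.length := by omega
      have hg1 : PySem.List.pyGetD L (m - 1) 0 = rmv ds (m.toNat - 1) := by
        have := PySem.List.pyGetD_eq_getElem L (i := m - 1) 0 (by omega) (by omega)
        rw [this]
        have hgd : L[(m - 1).toNat] = L.getD ((m - 1).toNat) 0 :=
          (List.getD_eq_getElem L 0 (by omega)).symm
        rw [hgd]
        have h1' : ((m - 1).toNat : Int) < m := by omega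
        have h2' : (m - 1).toNat = m.toNat - 1 := by omega
        rw [hL (m - 1).toNat (by omega), if_pos h1', h2']
      have hg2 : PySem.List.pyGetD L m 0 = ds.getD m.toNat 0 := by
        have := PySem.List.pyGetD_eq_getElem L (i := m) 0 (by omega) (by omega)
        rw [this]
        have hgd : L[m.toNat] = L.getD m.toNat 0 :=
          (List.getD_eq_getElem L 0 (by omega)).symm
        rw [hgd, hL m.toNat hmn', if_neg (by omega)]
      have hrmv : rmv ds m.toNat = max (rmv ds (m.toNat - 1)) (ds.getD m.toNat 0) := by
        have := rmv_succ ds (m.toNat - 1) (by omega)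
        rwa [Nat.sub_add_cancel (by omega)] at this
      rw [hg1, hg2]
      by_cases hc : rmv ds (m.toNat - 1) > ds.getD m.toNat 0
      · rw [if_pos hc]
        refine ⟨by simp [hLlen], ?_⟩
        intro i hi
        rw [List.getD_eq_getElem?_getD, List.getElem?_set]
        by_cases hieq : i = m.toNat
        · subst hieq
          rw [if_pos rfl, if_pos (by omega), Option.getD_some,
            if_pos (by omega), hrmv, max_eq_left hc.le]
        · rw [if_neg (by omega : ¬ m.toNat = i), ← List.getD_eq_getElem?_getD, hL i hi]
          by_cases hlt : (i : Int) < m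
          · rw [if_pos hlt, if_pos (by omega)]
          · rw [if_neg hlt, if_neg (by omega)]
      · rw [if_neg hc]
        refine ⟨hLlen, ?_⟩
        intro i hi
        rw [hL i hi]
        by_cases hieq : i = m.toNat
        · subst hieq
          rw [if_neg (by omega), if_pos (by omega), hrmv,
            max_eq_right (by omega)]
        · by_cases hlt : (i : Int) < m
          · rw [if_pos hlt, if_pos (by omega)]
          · rw [if_neg hlt, if_neg (by omega)])
  obtain ⟨hd2len, hd2⟩ := h2
  set days2 := (PySem.List.pyRange 1 (ds.length : Int) 1).foldl
    (fun ds' i => if PySem.List.pyGetD ds' (i - 1) 0 > PySem.List.pyGetD ds' i 0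
                  then ds'.set i.toNat (PySem.List.pyGetD ds' (i - 1) 0) else ds') ds with hdays2
  have hd2' : ∀ i : Nat, i < ds.length → days2.getD i 0 = rmv ds i := by
    intro i hi
    rw [hd2 i hi, if_pos (by omega)]
  -- pass 3 computes gstate
  rw [hd2len]
  have h3 := foldl_pyRange_invariant
    (fun (st : List Int × Int) i =>
      if PySem.List.pyGetD days2 (i - 1) 0 ≥ PySem.List.pyGetD days2 i 0
      then (st.1, st.2 + 1) else (st.1 ++ [st.2], 1))
    (fun m st => st = gstate ds m.toNat)
    1 (ds.length : Int) (by omega) ([], 1)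
    (by rfl)
    (by
      intro m st hm1 hmn hst
      simp only []
      have hmds : m.toNat < ds.length := by omega
      have hg1 : PySem.List.pyGetD days2 (m - 1) 0 = rmv ds (m.toNat - 1) := by
        have := PySem.List.pyGetD_eq_getElem days2 (i := m - 1) 0 (by omega) (by omega)
        rw [this]
        have hgd : days2[(m - 1).toNat]'(by omega) = days2.getD ((m - 1).toNat) 0 :=
          (List.getD_eq_getElem days2 0 (by omega)).symm
        have h2' : (m - 1).toNat = m.toNat - 1 := by omega
        rw [hgd, hd2' (m - 1).toNat (by omega), h2']
      have hg2 : PySem.List.pyGetD days2 m 0 = rmv ds m.toNat := by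
        have := PySem.List.pyGetD_eq_getElem days2 (i := m) 0 (by omega) (by omega)
        rw [this]
        have hgd : days2[m.toNat]'(by omega) = days2.getD m.toNat 0 :=
          (List.getD_eq_getElem days2 0 (by omega)).symm
        rw [hgd, hd2' m.toNat hmds]
      have hsucc : (m + 1).toNat = m.toNat + 1 := by omega
      rw [hg1, hg2, hst, hsucc, gstate_succ ds m.toNat (by omega)]
      unfold gstep
      by_cases hc : rmv ds (m.toNat - 1) ≥ rmv ds m.toNat
      · rw [if_pos hc]
      · rw [if_neg hc])
  rw [h3, Int.toNat_natCast, hdslen]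

theorem foldB_full (ds : List Int) (hne : ds ≠ []) :
    ds.foldl stepB ([], none, 1) =
      ((gstate ds ds.length).1, some (rmv ds (ds.length - 1)), (gstate ds ds.length).2) := by
  obtain ⟨d, t, rfl⟩ := List.exists_cons_of_ne_nil hne
  rw [List.foldl_cons]
  have hinit : stepB ([], none, 1) d =
      ((gstate (d :: t) 1).1, some (rmv (d :: t) 0), (gstate (d :: t) 1).2) := by
    simp [stepB, gstate, rmv_zero]
  rw [hinit]
  exact stepB_go (d :: t) 1 le_rfl (by simp)

theorem solution_alt_eq_gstate (progresses speeds : List Int) :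
    solution_alt progresses speeds =
      (gstate ((progresses.zip speeds).map (fun pr => cdiv pr.1 pr.2)) (progresses.zip speeds).length).1 ++
        [(gstate ((progresses.zip speeds).map (fun pr => cdiv pr.1 pr.2)) (progresses.zip speeds).length).2] := by
  unfold solution_alt
  set ds := (progresses.zip speeds).map (fun pr => cdiv pr.1 pr.2) with hds
  have hfold : (progresses.zip speeds).foldl
      (fun (st : List Int × Option Int × Int) pr =>
        let d := cdiv pr.1 pr.2
        match st with
        | (acc, none, tasks) => (acc, some d, tasks)
        | (acc, some front, tasks) =>
          if d ≤ front then (acc, some front, tasks + 1)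
          else (acc ++ [tasks], some d, 1))
      ([], none, 1) = ds.foldl stepB ([], none, 1) := by
    rw [hds, List.foldl_map]
    rfl
  rw [hfold]
  have hlen : (progresses.zip speeds).length = ds.length := by simp [hds]
  rw [hlen]
  rcases List.eq_nil_or_concat' ds with hnil | hne
  · simp [hnil, gstate]
  · rw [foldB_full ds (by rcases hne with ⟨a, l, h⟩; simp [h])]

-- ===== VERDICT (by name: the statement is the Claim_ definition above) =====
theorem solution_spec : Claim_equal_solution := by
  intro progresses speeds _ hpre
  unfold Spec_solution
  rw [solution_eq_gstate progresses speeds hpre, solution_alt_eq_gstate]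
  have : (progresses.zip speeds).length = progresses.length := by
    rw [List.length_zip]; exact Nat.min_eq_left hpre.1
  rw [this]
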